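-- pv_equiv track=rewrite | github.com/boknowswiki/mytraning | lintcode/python/1914_smart_sale.py | minItem
-- ===== SOURCE A (Python) =====
-- def minItem(ids, m):
--     # write your code here1
--     num_counts = {}
--     for id in ids:
--         num_counts[id] = num_counts.get(id, 0) + 1
--
--     counts = sorted(num_counts[id] for id in num_counts)[::-1]
--
--     while counts and counts[-1] <= m:
--         m -= counts.pop()
--
--     return len(counts)
-- ===== SOURCE B (Python) =====
-- def minItem(ids, m):
--     # Counting-sort style: bucket the multiplicities, then sweep count values
--     # ascending, removing whole buckets arithmetically instead of sorting.
--     cnt = {}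
--     for x in ids:
--         cnt[x] = cnt.get(x, 0) + 1
--     freq = {}
--     for c in cnt.values():
--         freq[c] = freq.get(c, 0) + 1
--     remaining = len(cnt)
--     for c in range(1, len(ids) + 1):
--         if c > m:
--             break
--         take = freq.get(c, 0)
--         k = min(take, m // c)
--         m -= k * c
--         remaining -= k
--     return remaining
-- ===== Notes on version B (the rewrite author's own statement) =====
-- stated objective: alternative
-- what changed: Replaces sorting the multiplicities and popping them one by one with a counting-sort bucket table over count values swept ascending, removing each whole bucket in one arithmetic step (min(take, m//c)); O(n) vs O(n log n) asymptotically, though a timing run read only ~1.3x at the largest size.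
import Mathlib
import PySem

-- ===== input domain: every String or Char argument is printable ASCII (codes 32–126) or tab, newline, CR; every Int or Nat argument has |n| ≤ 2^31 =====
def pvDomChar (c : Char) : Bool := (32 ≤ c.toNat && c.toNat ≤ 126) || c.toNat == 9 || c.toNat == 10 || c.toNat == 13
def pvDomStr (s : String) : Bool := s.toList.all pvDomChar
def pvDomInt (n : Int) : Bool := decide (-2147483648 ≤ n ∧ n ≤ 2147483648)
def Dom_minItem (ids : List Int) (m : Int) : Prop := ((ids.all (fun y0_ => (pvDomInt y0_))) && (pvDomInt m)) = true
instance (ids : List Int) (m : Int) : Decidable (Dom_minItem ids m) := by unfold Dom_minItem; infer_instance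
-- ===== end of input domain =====

-- B replaces A's sort-then-pop loop by a counting-sort bucket sweep over count values (alternative algorithm).

-- ===== PORT A =====
-- while counts and counts[-1] <= m: m -= counts.pop()
def minItemWhile : List Int → Int → List Int
  | [], _ => []
  | c :: cs, m =>
    let last := PySem.List.pyGetD (c :: cs) (-1) 0
    if last ≤ m then minItemWhile (c :: cs).dropLast (m - last) else c :: cs
termination_by l _ => l.length
decreasing_by simp [List.length_dropLast]

def minItem (ids : List Int) (m : Int) : Int :=
  let num_counts := ids.foldl (fun d x => d.insert x (d.getD x 0 + 1)) PySem.Dict.empty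
  -- sorted(num_counts[id] for id in num_counts)[::-1]  (lookup of a present key → getD)
  let counts := (PySem.List.slice? (PySem.List.sorted (num_counts.keys.map (fun k => num_counts.getD k 0)) (fun x => x) false) none none (-1)).getD []
  PySem.List.len (minItemWhile counts m)

-- ===== PORT B =====
-- for c in range(1, len(ids)+1): if c > m: break; take = freq.get(c,0); k = min(take, m//c); …
def minItemAltLoop (freq : PySem.Dict Int Int) (c stop m remaining : Int) : Int :=
  if stop ≤ c then remaining
  else if m < c then remaining
  else
    let take := freq.getD c 0
    let k := min take (PySem.Int.floordiv m c)
    minItemAltLoop freq (c + 1) stop (m - k * c) (remaining - k)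
termination_by (stop - c).toNat
decreasing_by omega

def minItem_alt (ids : List Int) (m : Int) : Int :=
  let cnt := ids.foldl (fun d x => d.insert x (d.getD x 0 + 1)) PySem.Dict.empty
  let freq := cnt.values.foldl (fun d c => d.insert c (d.getD c 0 + 1)) PySem.Dict.empty
  minItemAltLoop freq 1 (PySem.List.len ids + 1) m cnt.size

-- ===== PRECONDITION & SPEC =====
def Spec_minItem (ids : List Int) (m : Int) (out : Int) : Prop := out = minItem_alt ids m
instance (ids : List Int) (m : Int) (out : Int) : Decidable (Spec_minItem ids m out) := by unfold Spec_minItem; infer_instance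

-- ===== CLAIM (what is proved, stated in full; the proofs are below) =====
def Claim_equal_minItem : Prop := ∀ (ids : List Int) (m : Int), Dom_minItem ids m → Spec_minItem ids m (minItem ids m)

-- ===== LEMMAS AND PROOFS =====

-- number of elements a greedy ascending sweep consumes from l with budget m
def pvGreedy : List Int → Int → Nat
  | [], _ => 0
  | c :: cs, m => if c ≤ m then 1 + pvGreedy cs (m - c) else 0

-- the ascending multiset of count values c ∈ [lo, stop), each vals.count c times
def pvAsc (vals : List Int) (lo stop : Int) : List Int :=
  (PySem.List.pyRange lo stop 1).flatMap (fun v => List.replicate (vals.count v) v)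

theorem pvGreedy_le_length (l : List Int) (m : Int) : pvGreedy l m ≤ l.length := by
  induction l generalizing m with
  | nil => simp [pvGreedy]
  | cons c cs ih =>
    simp only [pvGreedy, List.length_cons]
    split_ifs
    · have := ih (m - c); omega
    · omega

theorem pvGreedy_eq_zero (l : List Int) (m : Int) (h : ∀ x ∈ l, m < x) : pvGreedy l m = 0 := by
  cases l with
  | nil => rfl
  | cons c cs =>
    have : m < c := h c (by simp)
    simp [pvGreedy, not_le.mpr this]

theorem minItemWhile_len (l : List Int) (m : Int) :
    (minItemWhile l m).length = l.length - pvGreedy l.reverse m := by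
  induction l using List.reverseRecOn generalizing m with
  | nil => simp [minItemWhile, pvGreedy]
  | append_singleton xs x ih =>
    have hne : xs ++ [x] ≠ [] := by simp
    obtain ⟨c, cs, hcc⟩ : ∃ c cs, xs ++ [x] = c :: cs := by
      cases h : xs ++ [x] with
      | nil => exact absurd h hne
      | cons c cs => exact ⟨c, cs, rfl⟩
    rw [hcc, minItemWhile, ← hcc]
    rw [PySem.List.pyGetD_neg_one_append_singleton]
    simp only [List.reverse_append, List.reverse_singleton, List.singleton_append, pvGreedy]
    split_ifs with hx
    · rw [List.dropLast_concat, ih]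
      simp only [List.length_append, List.length_singleton]
      have := pvGreedy_le_length xs.reverse (m - x)
      simp only [List.length_reverse] at this
      omega
    · simp

theorem pvGreedy_replicate (c : Int) (hc : 0 < c) (K : Nat) (rest : List Int) (m : Int) (hm : 0 ≤ m) :
    pvGreedy (List.replicate K c ++ rest) m =
      (if (m / c).toNat < K then (m / c).toNat else K + pvGreedy rest (m - K * c)) := by
  induction K generalizing m with
  | zero =>
    have : ¬ (m / c).toNat < 0 := by omega
    simp [this]
  | succ K ih =>
    rw [List.replicate_succ, List.cons_append]
    simp only [pvGreedy]
    by_cases hcm : c ≤ m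
    · have hq1 : 1 ≤ m / c := by
        rw [Int.le_ediv_iff_mul_le hc]; omega
      have hsub : (m - c) / c = m / c - 1 := by
        have h := Int.add_mul_ediv_right (m - c) 1 (show c ≠ 0 by omega)
        rw [one_mul, sub_add_cancel] at h
        omega
      rw [if_pos hcm, ih (m - c) (by omega)]
      have hq : ((m - c) / c).toNat = (m / c).toNat - 1 := by
        rw [hsub]; omega
      have hK1 : m - c - K * c = m - (K + 1 : Nat) * c := by push_cast; ring
      rw [hq, hK1]
      have h1 : (1 : Nat) ≤ (m / c).toNat := by omega
      split_ifs with h2 h3 h3 <;> omega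
    · have hq0 : m / c = 0 := Int.ediv_eq_zero_of_lt hm (by omega)
      simp [hcm, hq0]

theorem pvAsc_nil (vals : List Int) (lo stop : Int) (h : stop ≤ lo) : pvAsc vals lo stop = [] := by
  simp [pvAsc, PySem.List.pyRange_one_eq_nil h]

theorem pvAsc_cons (vals : List Int) (lo stop : Int) (h : lo < stop) :
    pvAsc vals lo stop = List.replicate (vals.count lo) lo ++ pvAsc vals (lo + 1) stop := by
  simp [pvAsc, PySem.List.pyRange_one_cons h]

theorem mem_pvAsc (vals : List Int) (lo stop x : Int) (h : x ∈ pvAsc vals lo stop) : lo ≤ x := by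
  simp only [pvAsc, List.mem_flatMap] at h
  obtain ⟨v, hv, hx⟩ := h
  rw [PySem.List.mem_pyRange_one] at hv
  rw [List.eq_of_mem_replicate hx]
  exact hv.1

theorem minItemAltLoop_spec (freq : PySem.Dict Int Int) (vals : List Int)
    (hfreq : ∀ c : Int, freq.getD c 0 = (vals.count c : Int)) :
    ∀ (c stop m r : Int), 1 ≤ c →
      minItemAltLoop freq c stop m r = r - pvGreedy (pvAsc vals c stop) m := by
  intro c stop m r hc
  induction hn : (stop - c).toNat generalizing c m r with
  | zero =>
    have hsc : stop ≤ c := by omega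
    rw [minItemAltLoop, if_pos hsc, pvAsc_nil _ _ _ hsc]
    simp [pvGreedy]
  | succ n ih =>
    have hcs : c < stop := by omega
    rw [minItemAltLoop, if_neg (by omega), pvAsc_cons _ _ _ hcs]
    by_cases hmc : m < c
    · rw [if_pos hmc]
      have hz : pvGreedy (List.replicate (vals.count c) c ++ pvAsc vals (c + 1) stop) m = 0 := by
        apply pvGreedy_eq_zero
        intro x hx
        rcases List.mem_append.mp hx with h | h
        · rw [List.eq_of_mem_replicate h]; exact hmc
        · have := mem_pvAsc _ _ _ _ h; omega
      rw [hz]; simp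
    · rw [if_neg hmc]
      have hm0 : 0 ≤ m := by omega
      have hc0 : 0 < c := by omega
      have hdiv : PySem.Int.floordiv m c = m / c := PySem.Int.floordiv_eq_ediv_of_pos hc0
      have hq0 : 0 ≤ m / c := Int.ediv_nonneg hm0 (by omega)
      have hrep := pvGreedy_replicate c hc0 (vals.count c) (pvAsc vals (c + 1) stop) m hm0
      rw [hrep]
      set K : Nat := vals.count c with hK
      set q : Int := m / c with hq
      have hkeq : min (freq.getD c 0) (PySem.Int.floordiv m c) = (min (K : Int) q) := by
        rw [hfreq c, hdiv]
      simp only [hkeq]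
      by_cases hlt : q.toNat < K
      · have hmin : min (K : Int) q = q := by omega
        rw [if_pos hlt, hmin]
        have hrec := ih (c + 1) (m - q * c) (r - q) (by omega) (by omega)
        rw [hrec]
        have hmod : m - q * c < c := by
          have h2 : m % c < c := Int.emod_lt_of_pos m hc0
          have h1 : m % c = m - m / c * c := by rw [Int.emod_def]; ring
          rw [hq]
          omega
        have hz : pvGreedy (pvAsc vals (c + 1) stop) (m - q * c) = 0 := by
          apply pvGreedy_eq_zero
          intro x hx
          have hx1 := mem_pvAsc _ _ _ _ hx
          omega
        rw [hz]; omega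
      · have hmin : min (K : Int) q = (K : Int) := by omega
        rw [if_neg hlt, hmin]
        have hrec := ih (c + 1) (m - (K : Int) * c) (r - (K : Int)) (by omega) (by omega)
        rw [hrec]
        push_cast
        omega

-- every multiplicity lies in [1, ids.length]
theorem vals_bounds (ids : List Int) (v : Int)
    (hv : v ∈ (PySem.Dict.counter ids).values) : 1 ≤ v ∧ v ≤ (ids.length : Int) := by
  have hv' : v ∈ (PySem.Dict.counter ids).items.map (·.2) := hv
  rw [PySem.Dict.items_counter] at hv'
  simp only [List.map_map, Function.comp, List.mem_map] at hv'
  obtain ⟨k, hk, hkv⟩ := hv'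
  have hkmem : k ∈ ids := (PySem.Set.mem_ofList ids k).mp hk
  have h1 : 0 < ids.count k := List.count_pos_iff.mpr hkmem
  have h2 : ids.count k ≤ ids.length := List.count_le_length
  omega

theorem count_pvAsc (vals : List Int) (x : Int) :
    ∀ (lo stop : Int), (pvAsc vals lo stop).count x
      = (if lo ≤ x ∧ x < stop then vals.count x else 0) := by
  intro lo stop
  induction hn : (stop - lo).toNat generalizing lo with
  | zero =>
    rw [pvAsc_nil _ _ _ (by omega)]
    have : ¬ (lo ≤ x ∧ x < stop) := by omega
    simp [this]
  | succ n ih =>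
    have hcs : lo < stop := by omega
    rw [pvAsc_cons _ _ _ hcs, List.count_append, List.count_replicate, ih (lo + 1) (by omega)]
    by_cases hx : x = lo
    · rw [if_pos (by simp [hx]), if_neg (by omega : ¬ (lo + 1 ≤ x ∧ x < stop)),
          if_pos (⟨by omega, by omega⟩ : lo ≤ x ∧ x < stop), hx]
      omega
    · have hne : ¬ (lo == x) = true := by simp [Ne.symm hx]
      rw [if_neg hne, Nat.zero_add]
      split_ifs <;> omega

theorem pairwise_pvAsc (vals : List Int) : ∀ (lo stop : Int), (pvAsc vals lo stop).Pairwise (· ≤ ·) := by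
  intro lo stop
  induction hn : (stop - lo).toNat generalizing lo with
  | zero => rw [pvAsc_nil _ _ _ (by omega)]; exact List.Pairwise.nil
  | succ n ih =>
    have hcs : lo < stop := by omega
    rw [pvAsc_cons _ _ _ hcs]
    rw [List.pairwise_append]
    refine ⟨?_, ih (lo + 1) (by omega), ?_⟩
    · exact List.pairwise_replicate.mpr (Or.inr (le_refl lo))
    · intro a ha b hb
      have h1 := List.eq_of_mem_replicate ha
      have h2 := mem_pvAsc _ _ _ _ hb
      omega

theorem pvAsc_eq_sorted (ids : List Int) :
    PySem.List.sorted (PySem.Dict.counter ids).values (fun x => x) false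
      = pvAsc (PySem.Dict.counter ids).values 1 ((ids.length : Int) + 1) := by
  set vals := (PySem.Dict.counter ids).values with hv
  apply PySem.List.sorted_id_eq_of_perm_of_pairwise
  · rw [List.perm_iff_count]
    intro x
    rw [count_pvAsc]
    by_cases hx : 1 ≤ x ∧ x < (ids.length : Int) + 1
    · simp [hx]
    · have hnot : x ∉ vals := by
        intro hmem
        exact hx ⟨(vals_bounds ids x hmem).1, by have := (vals_bounds ids x hmem).2; omega⟩
      simp [List.count_eq_zero.mpr hnot]
  · exact pairwise_pvAsc _ _ _

theorem size_counter_eq (ids : List Int) :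
    (PySem.Dict.counter ids).size = (PySem.Dict.counter ids).values.length := by
  simp [PySem.Dict.size, PySem.Dict.values]

-- A's generator: [num_counts[k] for k in num_counts] is exactly values
theorem keys_map_getD (d : PySem.Dict Int Int) (hd : d.keys.Nodup) :
    d.keys.map (fun k => d.getD k 0) = d.values := by
  show List.map (fun k => d.getD k 0) (List.map (fun p => p.1) d.items)
      = List.map (fun p => p.2) d.items
  rw [List.map_map]
  apply List.map_congr_left
  intro p hp
  exact PySem.Dict.getD_of_mem_items d (by simpa using hp) hd 0

theorem minItem_eq (ids : List Int) (m : Int) :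
    minItem ids m = ((PySem.Dict.counter ids).values.length : Int)
      - (pvGreedy (PySem.List.sorted (PySem.Dict.counter ids).values (fun x => x) false) m : Int) := by
  simp only [minItem]
  rw [PySem.Dict.foldl_insert_getD_add_one_eq_counter,
      keys_map_getD _ (PySem.Dict.nodup_keys_counter ids)]
  rw [PySem.List.slice?_none_none_neg_one]
  simp only [Option.getD_some, PySem.List.len_eq]
  rw [minItemWhile_len, List.reverse_reverse, List.length_reverse, PySem.List.length_sorted]
  have hle := pvGreedy_le_length (PySem.List.sorted (PySem.Dict.counter ids).values (fun x => x) false) m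
  rw [PySem.List.length_sorted] at hle
  omega

-- ===== VERDICT (by name: the statement is the Claim_ definition above) =====
theorem minItem_spec : Claim_equal_minItem := by
  intro ids m _
  unfold Spec_minItem
  rw [minItem_eq]
  simp only [minItem_alt]
  rw [PySem.Dict.foldl_insert_getD_add_one_eq_counter ids,
      PySem.Dict.foldl_insert_getD_add_one_eq_counter]
  rw [minItemAltLoop_spec _ (PySem.Dict.counter ids).values
      (fun c => PySem.Dict.getD_counter _ c) 1
      ((PySem.List.len ids) + 1) m _ (by omega)]
  rw [size_counter_eq]
  simp only [PySem.List.len_eq]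
  rw [← pvAsc_eq_sorted]
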